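-- pv_equiv track=rewrite | github.com/MatteoCalzetta/Tardy-solver | tests/ampl_test_scaling.py | edd_heuristic
-- ===== SOURCE A (Python) =====
-- def edd_heuristic(r, p, d):
--     """Euristica EDD con release times."""
--     n = len(r)
--     done = [False]*n
--     t = 0
--     C = [0]*n
--     remaining = n
--     while remaining > 0:
--         available = [j for j in range(n) if not done[j] and r[j] <= t]
--         if not available:
--             t = min([r[j] for j in range(n) if not done[j]], default=t)
--             continue
--         j_pick = min(available, key=lambda j: (d[j], j))
--         start = max(t, r[j_pick])
--         finish = start + p[j_pick]
--         C[j_pick] = finish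
--         done[j_pick] = True
--         remaining -= 1
--         t = finish
--     tardy = sum(1 for j in range(n) if C[j] > d[j])
--     return tardy
-- ===== SOURCE B (Python) =====
-- def edd_heuristic(r, p, d):
--     """EDD heuristic with release times: pre-sort jobs in EDD order once, then
--     repeatedly take the first still-available job in that order, counting tardy
--     jobs on the fly (no done flags, no completion array)."""
--     rem = sorted(range(len(r)), key=lambda j: (d[j], j))
--     t = 0
--     tardy = 0
--     while rem:
--         k = next((i for i, j in enumerate(rem) if r[j] <= t), None)
--         if k is None:
--             t = min(r[j] for j in rem)
--             k = next(i for i, j in enumerate(rem) if r[j] <= t)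
--         j = rem.pop(k)
--         t += p[j]
--         if t > d[j]:
--             tardy += 1
--     return tardy
-- ===== Notes on version B (the rewrite author's own statement) =====
-- stated objective: faster
-- what changed: B pre-sorts the job indices once in EDD order (deadline, index) and then repeatedly pops the first already-released job of that order from a shrinking list, counting tardy jobs on the fly, instead of A's per-iteration rebuild of the full available list over done-flags, min-by-key scan, and completion-time array with a final counting pass.
import Mathlib
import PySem

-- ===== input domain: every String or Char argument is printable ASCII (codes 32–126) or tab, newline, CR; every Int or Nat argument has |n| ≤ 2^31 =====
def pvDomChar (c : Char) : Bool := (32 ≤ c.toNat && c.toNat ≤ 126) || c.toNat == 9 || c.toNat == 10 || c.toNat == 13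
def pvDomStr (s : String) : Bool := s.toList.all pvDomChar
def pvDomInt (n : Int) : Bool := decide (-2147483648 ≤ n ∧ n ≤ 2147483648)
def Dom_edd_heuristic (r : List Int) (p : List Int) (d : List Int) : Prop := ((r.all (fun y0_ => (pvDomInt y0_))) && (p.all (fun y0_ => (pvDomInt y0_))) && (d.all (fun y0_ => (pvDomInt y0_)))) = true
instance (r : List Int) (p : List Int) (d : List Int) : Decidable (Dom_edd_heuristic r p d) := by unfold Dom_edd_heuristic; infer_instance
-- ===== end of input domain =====

-- B re-implements A's EDD-with-release-times simulation by pre-sorting the jobs in EDD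
-- order once and popping the first already-released job of that order each step, counting
-- tardy jobs on the fly (no done-flag array, no completion array, no per-iteration rebuild
-- of the available list; measurably faster on the generated timing inputs).

-- ===== PORT A =====

-- `available = [j for j in range(n) if not done[j] and r[j] <= t]`
def pvAvailA (r : List Int) (done : List Bool) (t : Int) : List Nat :=
  (List.range r.length).filter (fun j => !done.getD j true && decide (r.getD j 0 ≤ t))

-- `min(available, key=lambda j: (d[j], j))` on a nonempty list: Python's min keeps the
-- first (here: unique) extremal element; exact fold over the list.
def pvPick (d : List Int) (a : Nat) (rest : List Nat) : Nat :=
  rest.foldl (fun m x =>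
    if d.getD x 0 < d.getD m 0 ∨ (d.getD x 0 = d.getD m 0 ∧ x < m) then x else m) a

-- `min([r[j] for j in range(n) if not done[j]], default=t)` (hand port, exact:
-- Python returns the default on an empty list, else the minimum).
def pvMinRelease (r : List Int) (done : List Bool) (t : Int) : Int :=
  match ((List.range r.length).filter (fun j => !done.getD j true)).map (fun j => r.getD j 0) with
  | [] => t
  | x :: xs => xs.foldl min x

-- A's while-loop, fuel = `remaining`.  Python's `continue` branch (available empty) is
-- followed in the next iteration by a successful pick, so the port performs the time
-- jump and that pick in one step; the `[] => C` arm after the jump is unreachable.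
def pvLoopA (r p d : List Int) : Nat → List Bool → List Int → Int → List Int
  | 0, _, C, _ => C
  | rem+1, done, C, t =>
    match pvAvailA r done t with
    | [] =>
      let t' := pvMinRelease r done t
      match pvAvailA r done t' with
      | [] => C
      | a :: as =>
        let j := pvPick d a as
        let finish := max t' (r.getD j 0) + p.getD j 0
        pvLoopA r p d rem (done.set j true) (C.set j finish) finish
    | a :: as =>
      let j := pvPick d a as
      let finish := max t (r.getD j 0) + p.getD j 0
      pvLoopA r p d rem (done.set j true) (C.set j finish) finish

def edd_heuristic (r : List Int) (p : List Int) (d : List Int) : Int :=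
  let n := r.length
  let C := pvLoopA r p d n (List.replicate n false) (List.replicate n 0) 0
  -- `sum(1 for j in range(n) if C[j] > d[j])`
  (List.range n).foldl (fun acc j => if d.getD j 0 < C.getD j 0 then acc + 1 else acc) 0

-- ===== PORT B =====

-- `sorted(range(len(r)), key=lambda j: (d[j], j))`
def pvEddOrder (r d : List Int) : List Nat :=
  PySem.List.sorted2 (List.range r.length) (fun j => d.getD j 0) (fun j => j) false

-- needed by pvLoopB's termination proof
theorem pvFindIdx?_lt_length {α : Type} {l : List α} {q : α → Bool} {k : Nat}
    (h : l.findIdx? q = some k) : k < l.length :=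
  (List.findIdx?_eq_some_iff_findIdx_eq.mp h).1

-- Source B's while-loop: find the first EDD-ordered job already released, pop it,
-- advance the clock, bump the tardy counter.  The inner `[] => …`/`none => tardy`
-- arms are unreachable (rem is nonempty there).
def pvLoopB (r p d : List Int) (rem : List Nat) (t tardy : Int) : Int :=
  if rem.isEmpty then tardy
  else
    match hk : rem.findIdx? (fun j => decide (r.getD j 0 ≤ t)) with
    | some k =>
      let j := rem.getD k 0
      let t' := t + p.getD j 0
      pvLoopB r p d (rem.eraseIdx k) t' (if d.getD j 0 < t' then tardy + 1 else tardy)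
    | none =>
      let t' := match rem.map (fun j => r.getD j 0) with
                | [] => t
                | x :: xs => xs.foldl min x
      match hk2 : rem.findIdx? (fun j => decide (r.getD j 0 ≤ t')) with
      | some k =>
        let j := rem.getD k 0
        let t'' := t' + p.getD j 0
        pvLoopB r p d (rem.eraseIdx k) t'' (if d.getD j 0 < t'' then tardy + 1 else tardy)
      | none => tardy
termination_by rem.length
decreasing_by
  · have := pvFindIdx?_lt_length hk
    simp [List.length_eraseIdx, this]; omega
  · have := pvFindIdx?_lt_length hk2
    simp [List.length_eraseIdx, this]; omega

def edd_heuristic_alt (r : List Int) (p : List Int) (d : List Int) : Int :=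
  pvLoopB r p d (pvEddOrder r d) 0 0

-- ===== PRECONDITION & SPEC =====

-- Pre_ excludes only the inputs on which the Python A raises (IndexError): p or d
-- shorter than r.  It is not used by the equivalence proof (the Lean ports are total).
def Pre_edd_heuristic (r : List Int) (p : List Int) (d : List Int) : Prop :=
  r.length ≤ p.length ∧ r.length ≤ d.length
instance (r : List Int) (p : List Int) (d : List Int) : Decidable (Pre_edd_heuristic r p d) := by unfold Pre_edd_heuristic; infer_instance

def pvWitness_edd_heuristic : List Int × List Int × List Int :=
  ([3, 0, 0], [2, 2, 1], [4, 9, 2])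

def Spec_edd_heuristic (r : List Int) (p : List Int) (d : List Int) (out : Int) : Prop := out = edd_heuristic_alt r p d
instance (r : List Int) (p : List Int) (d : List Int) (out : Int) : Decidable (Spec_edd_heuristic r p d out) := by unfold Spec_edd_heuristic; infer_instance

-- ===== CLAIM (what is proved, stated in full; the proofs are below) =====
def Claim_equal_edd_heuristic : Prop := ∀ (r : List Int) (p : List Int) (d : List Int), Dom_edd_heuristic r p d → Pre_edd_heuristic r p d → Spec_edd_heuristic r p d (edd_heuristic r p d)

-- ===== LEMMAS AND PROOFS =====

-- the strict EDD order on job indices: Python's tuple key (d[j], j), lexicographically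
def pvLt (d : List Int) (x y : Nat) : Prop :=
  d.getD x 0 < d.getD y 0 ∨ (d.getD x 0 = d.getD y 0 ∧ x < y)

theorem pvLt_trans {d : List Int} {x y z : Nat} (h1 : pvLt d x y) (h2 : pvLt d y z) : pvLt d x z := by
  rcases h1 with h1 | ⟨h1, h1'⟩ <;> rcases h2 with h2 | ⟨h2, h2'⟩ <;>
    simp only [pvLt] <;> omega

theorem pvLt_total {d : List Int} {x y : Nat} (h : ¬ pvLt d x y) (hne : x ≠ y) : pvLt d y x := by
  simp only [pvLt, not_or, not_and] at h ⊢
  omega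

-- tardy jobs among the already-scheduled ones
def pvDoneTardy (d : List Int) (n : Nat) (done : List Bool) (C : List Int) : Nat :=
  (List.range n).countP (fun j => done.getD j true && decide (d.getD j 0 < C.getD j 0))

theorem pvPick_spec (d : List Int) : ∀ (as : List Nat) (a : Nat),
    pvPick d a as ∈ a :: as ∧ ∀ y ∈ a :: as, ¬ pvLt d y (pvPick d a as) := by
  intro as
  induction as with
  | nil =>
    intro a
    simp [pvPick, pvLt]
  | cons x xs ih =>
    intro a
    have hstep : pvPick d a (x :: xs)
        = pvPick d (if d.getD x 0 < d.getD a 0 ∨ (d.getD x 0 = d.getD a 0 ∧ x < a) then x else a) xs := by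
      simp [pvPick, List.foldl_cons]
    by_cases hc : pvLt d x a
    · have hx : pvPick d a (x :: xs) = pvPick d x xs := by
        rw [hstep, if_pos (show d.getD x 0 < d.getD a 0 ∨ (d.getD x 0 = d.getD a 0 ∧ x < a) from hc)]
      obtain ⟨hmem, hmin⟩ := ih x
      rw [hx]
      constructor
      · rcases List.mem_cons.mp hmem with h | h
        · simp [h]
        · simp [h]
      · intro y hy
        rcases List.mem_cons.mp hy with h | hy2
        · subst h
          intro hlt
          exact hmin x (List.mem_cons_self) (pvLt_trans hc hlt)
        · exact hmin y hy2
    · have hx : pvPick d a (x :: xs) = pvPick d a xs := by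
        rw [hstep, if_neg (show ¬(d.getD x 0 < d.getD a 0 ∨ (d.getD x 0 = d.getD a 0 ∧ x < a)) from hc)]
      obtain ⟨hmem, hmin⟩ := ih a
      rw [hx]
      constructor
      · rcases List.mem_cons.mp hmem with h | h
        · simp [h]
        · simp [h]
      · intro y hy
        rcases List.mem_cons.mp hy with h | hy2
        · subst h
          exact hmin y List.mem_cons_self
        · rcases List.mem_cons.mp hy2 with h | h
          · subst h
            intro hlt
            by_cases hxa : y = a
            · subst hxa; exact hmin y List.mem_cons_self hlt
            · exact hmin a List.mem_cons_self (pvLt_trans (pvLt_total hc hxa) hlt)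
          · exact hmin y (List.mem_cons_of_mem _ h)

theorem pvInsertBy_nil {α : Type} (b : α → α → Bool) (x : α) :
    PySem.List.insertBy b x [] = [x] := rfl
theorem pvInsertBy_cons {α : Type} (b : α → α → Bool) (x y : α) (ys : List α) :
    PySem.List.insertBy b x (y :: ys) =
      if b x y then x :: y :: ys else y :: PySem.List.insertBy b x ys := rfl

theorem pvBefore_iff (d : List Int) (a b : Nat) :
    (decide (d.getD a 0 < d.getD b 0) || (!decide (d.getD b 0 < d.getD a 0) && decide (a < b))) = true
      ↔ pvLt d a b := by
  simp [pvLt]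
  omega

theorem pvInsertBy_mem {α : Type} (b : α → α → Bool) (x y : α) (ys : List α) :
    y ∈ PySem.List.insertBy b x ys ↔ y = x ∨ y ∈ ys := PySem.List.mem_insertBy b x y ys

theorem pvInsertBy_pairwise (d : List Int) (x : Nat) : ∀ (ys : List Nat),
    ys.Pairwise (pvLt d) → x ∉ ys →
    (PySem.List.insertBy (fun a b =>
        decide (d.getD a 0 < d.getD b 0) || (!decide (d.getD b 0 < d.getD a 0) && decide (a < b)))
      x ys).Pairwise (pvLt d) := by
  intro ys
  induction ys with
  | nil => intro _ _; simp [pvInsertBy_nil]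
  | cons y ys ih =>
    intro hp hx
    rw [pvInsertBy_cons]
    rcases List.pairwise_cons.mp hp with ⟨hy, hp'⟩
    by_cases hb : pvLt d x y
    · rw [if_pos ((pvBefore_iff d x y).mpr hb)]
      refine List.pairwise_cons.mpr ⟨?_, hp⟩
      intro z hz
      rcases List.mem_cons.mp hz with h | h
      · exact h ▸ hb
      · exact pvLt_trans hb (hy z h)
    · rw [if_neg (by rw [pvBefore_iff]; exact hb)]
      refine List.pairwise_cons.mpr ⟨?_, ih hp' (by simp at hx; tauto)⟩
      intro z hz
      rcases (pvInsertBy_mem _ x z ys).mp hz with h | h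
      · subst h
        exact pvLt_total hb (by simp at hx; tauto)
      · exact hy z h
theorem pvFoldl_insertBy_pairwise (d : List Int) : ∀ (xs acc : List Nat),
    acc.Pairwise (pvLt d) → (∀ x ∈ xs, x ∉ acc) → xs.Nodup →
    (xs.foldl (fun ac x =>
        PySem.List.insertBy (fun a b =>
          decide (d.getD a 0 < d.getD b 0) || (!decide (d.getD b 0 < d.getD a 0) && decide (a < b)))
        x ac) acc).Pairwise (pvLt d) := by
  intro xs
  induction xs with
  | nil => intro acc h _ _; simpa using h
  | cons x xs ih =>
    intro acc hacc hnin hnd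
    rcases List.nodup_cons.mp hnd with ⟨hx, hnd'⟩
    simp only [List.foldl_cons]
    apply ih
    · exact pvInsertBy_pairwise d x acc hacc (hnin x List.mem_cons_self)
    · intro z hz
      rw [pvInsertBy_mem]
      rintro (h | h)
      · exact hx (h ▸ hz)
      · exact hnin z (List.mem_cons_of_mem _ hz) h
    · exact hnd'

theorem pvEddOrder_pairwise (r d : List Int) : (pvEddOrder r d).Pairwise (pvLt d) := by
  have : pvEddOrder r d = (List.range r.length).foldl (fun ac x =>
      PySem.List.insertBy (fun a b =>
        decide (d.getD a 0 < d.getD b 0) || (!decide (d.getD b 0 < d.getD a 0) && decide (a < b)))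
      x ac) [] := by
    rfl
  rw [this]
  exact pvFoldl_insertBy_pairwise d _ [] (by simp) (by simp) List.nodup_range

theorem pvEddOrder_perm (r d : List Int) : (pvEddOrder r d).Perm (List.range r.length) :=
  PySem.List.sorted2_perm _ _ _ _

theorem pvEddOrder_nodup (r d : List Int) : (pvEddOrder r d).Nodup :=
  ((pvEddOrder_perm r d).nodup_iff).mpr List.nodup_range

-- membership in A's available list
theorem pvMem_avail {r : List Int} {done : List Bool} {t : Int} {x : Nat} :
    x ∈ pvAvailA r done t ↔ x < r.length ∧ done.getD x true = false ∧ r.getD x 0 ≤ t := by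
  simp [pvAvailA, List.mem_filter, List.mem_range]

theorem pvMem_rem {r d : List Int} {done : List Bool} {x : Nat} :
    x ∈ (pvEddOrder r d).filter (fun j => !done.getD j true) ↔
      x < r.length ∧ done.getD x true = false := by
  rw [List.mem_filter, (pvEddOrder_perm r d).mem_iff]
  simp [List.mem_range]

-- minimum of two permuted nonempty lists agree; one fresh flip in a countP;
-- removing the unique element at index k is removing it everywhere
theorem pvMinEq {l1 l2 : List Int} {x y : Int} {xs ys : List Int}
    (hperm : l1.Perm l2) (h1 : l1 = x :: xs) (h2 : l2 = y :: ys) :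
    xs.foldl min x = ys.foldl min y := by
  obtain ⟨hle1, hmem1⟩ := PySem.List.foldl_min_le xs x
  obtain ⟨hle2, hmem2⟩ := PySem.List.foldl_min_le ys y
  have hm1 : xs.foldl min x ∈ l1 := by
    rcases PySem.List.foldl_min_mem xs x with h | h
    · rw [h1, h]; exact List.mem_cons_self
    · rw [h1]; exact List.mem_cons_of_mem _ h
  have hm2 : ys.foldl min y ∈ l2 := by
    rcases PySem.List.foldl_min_mem ys y with h | h
    · rw [h2, h]; exact List.mem_cons_self
    · rw [h2]; exact List.mem_cons_of_mem _ h
  have h12 : xs.foldl min x ≤ ys.foldl min y := by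
    have := hperm.symm.mem_iff.mp hm2
    rw [h1] at this
    rcases List.mem_cons.mp this with h | h
    · rw [h]; exact hle1
    · exact hmem1 _ h
  have h21 : ys.foldl min y ≤ xs.foldl min x := by
    have := hperm.mem_iff.mp hm1
    rw [h2] at this
    rcases List.mem_cons.mp this with h | h
    · rw [h]; exact hle2
    · exact hmem2 _ h
  omega

theorem pvCountP_update : ∀ (l : List Nat) (q q' : Nat → Bool) (j : Nat),
    j ∈ l → l.Nodup → (∀ x ∈ l, x ≠ j → q' x = q x) → q j = false →
    (l.countP q' : Int) = l.countP q + (if q' j then 1 else 0) := by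
  intro l
  induction l with
  | nil => intro _ _ _ h; simp at h
  | cons a l ih =>
    intro q q' j hj hnd hag hqj
    rcases List.nodup_cons.mp hnd with ⟨ha, hnd'⟩
    rcases List.mem_cons.mp hj with h | h
    · subst h
      have hql : ∀ x ∈ l, q' x = q x := fun x hx => hag x (List.mem_cons_of_mem _ hx) (fun he => ha (he ▸ hx))
      have hc : l.countP q' = l.countP q := List.countP_congr (fun x hx => by rw [hql x hx])
      rw [List.countP_cons, List.countP_cons, hc, hqj]
      by_cases hq : q' j <;> simp [hq]
    · have hja : j ≠ a := fun he => ha (he ▸ h)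
      have hqa : q' a = q a := hag a List.mem_cons_self (fun he => hja he.symm)
      have := ih q q' j h hnd' (fun x hx => hag x (List.mem_cons_of_mem _ hx)) hqj
      simp [List.countP_cons, hqa]
      by_cases hq : q a <;> simp [hq] <;> omega

theorem pvEraseIdx_eq_filter : ∀ (rem : List Nat) (k j : Nat), rem.Nodup →
    rem[k]? = some j → rem.eraseIdx k = rem.filter (fun x => x ≠ j) := by
  intro rem
  induction rem with
  | nil => intro k j _ h; simp at h
  | cons a l ih =>
    intro k j hnd hget
    rcases List.nodup_cons.mp hnd with ⟨ha, hnd'⟩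
    cases k with
    | zero =>
      simp at hget
      subst hget
      simp [List.eraseIdx]
      exact (List.filter_eq_self.mpr (fun x hx => by
        simp; exact fun he => ha (he ▸ hx))).symm
    | succ k =>
      simp at hget
      have hjl : j ∈ l := List.mem_of_getElem? hget
      have haj : a ≠ j := fun he => ha (he ▸ hjl)
      simp [List.eraseIdx, haj, ih k j hnd' hget]


theorem pvGetD_set_ne {α : Type} (l : List α) (j x : Nat) (v dft : α) (h : x ≠ j) :
    (l.set j v).getD x dft = l.getD x dft := by
  rw [List.getD_eq_getElem?_getD, List.getElem?_set, if_neg (fun he => h he.symm),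
    ← List.getD_eq_getElem?_getD]

theorem pvGetD_set_self {α : Type} (l : List α) (j : Nat) (v dft : α) (h : j < l.length) :
    (l.set j v).getD j dft = v := by
  rw [List.getD_eq_getElem?_getD, List.getElem?_set]
  simp [h]

-- full characterisation of findIdx?: first index whose element satisfies q
theorem pvFindIdx?_spec {α : Type} (q : α → Bool) : ∀ (l : List α) (k : Nat),
    l.findIdx? q = some k →
    ∃ h : k < l.length, q (l[k]'h) = true ∧ ∀ i (hi : i < l.length), i < k → q (l[i]'hi) = false := by
  intro l
  induction l with
  | nil => intro k h; simp at h
  | cons x xs ih =>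
    intro k h
    rw [List.findIdx?_cons] at h
    by_cases hq : q x
    · rw [if_pos hq] at h
      simp at h
      subst h
      exact ⟨by simp, hq, fun i hi hik => absurd hik (by omega)⟩
    · rw [if_neg hq] at h
      rcases Option.map_eq_some_iff.mp h with ⟨k', hk', rfl⟩
      obtain ⟨hlt, hqk, hfst⟩ := ih k' hk'
      refine ⟨by simpa using hlt, by simpa using hqk, ?_⟩
      intro i hi hik
      cases i with
      | zero => simpa using hq
      | succ i => exact hfst i (by simpa using hi) (by omega)

theorem pvFilterSet (r d : List Int) (done : List Bool) (j : Nat)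
    (hlen : done.length = r.length) (hjn : j < r.length) :
    ((pvEddOrder r d).filter (fun x => !done.getD x true)).filter (fun x => x ≠ j)
      = (pvEddOrder r d).filter (fun x => !(done.set j true).getD x true) := by
  rw [List.filter_filter]
  apply List.filter_congr
  intro x hx
  by_cases hxj : x = j
  · rw [hxj, pvGetD_set_self done j true true (by rw [hlen]; exact hjn)]
    simp
  · rw [pvGetD_set_ne done j x true true hxj]
    simp [hxj]

-- the first released job of the EDD order is exactly A's min-by-(d,j) available job
theorem pvStep {r d : List Int} {done : List Bool} {rem : List Nat} {t : Int} {k : Nat}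
    (hlen : done.length = r.length)
    (hrem : rem = (pvEddOrder r d).filter (fun j => !done.getD j true))
    (hk : rem.findIdx? (fun j => decide (r.getD j 0 ≤ t)) = some k) :
    (∀ a as, pvAvailA r done t = a :: as → pvPick d a as = rem.getD k 0) ∧
    pvAvailA r done t ≠ [] ∧
    r.getD (rem.getD k 0) 0 ≤ t ∧ rem.getD k 0 < r.length ∧
    done.getD (rem.getD k 0) true = false ∧
    rem.eraseIdx k =
      (pvEddOrder r d).filter (fun j => !(done.set (rem.getD k 0) true).getD j true) := by
  obtain ⟨hkl, hqk, hfst⟩ := pvFindIdx?_spec _ rem k hk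
  have hjd : rem.getD k 0 = rem[k]'hkl := by
    rw [List.getD_eq_getElem?_getD, List.getElem?_eq_getElem hkl]; rfl
  have hrt : r.getD (rem.getD k 0) 0 ≤ t := by rw [hjd]; exact of_decide_eq_true hqk
  have hjmem : rem.getD k 0 ∈ rem := by rw [hjd]; exact List.getElem_mem hkl
  have hmemrem : ∀ x ∈ rem, x < r.length ∧ done.getD x true = false := by
    intro x hx
    rw [hrem] at hx
    exact pvMem_rem.mp hx
  have hjn : rem.getD k 0 < r.length := (hmemrem _ hjmem).1
  have hjdone : done.getD (rem.getD k 0) true = false := (hmemrem _ hjmem).2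
  have hjavail : rem.getD k 0 ∈ pvAvailA r done t := pvMem_avail.mpr ⟨hjn, hjdone, hrt⟩
  have hnodup : rem.Nodup := hrem ▸ (pvEddOrder_nodup r d).filter _
  have hpw : rem.Pairwise (pvLt d) := hrem ▸ (pvEddOrder_pairwise r d).filter _
  refine ⟨?_, List.ne_nil_of_mem hjavail, hrt, hjn, hjdone, ?_⟩
  · intro a as he
    obtain ⟨hmem, hmin⟩ := pvPick_spec d as a
    have hmav : pvPick d a as ∈ pvAvailA r done t := he ▸ hmem
    have hm := pvMem_avail.mp hmav
    have hmrem : pvPick d a as ∈ rem := by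
      rw [hrem]; exact pvMem_rem.mpr ⟨hm.1, hm.2.1⟩
    obtain ⟨i, hi, hie⟩ := List.mem_iff_getElem.mp hmrem
    rcases lt_trichotomy i k with hik | hik | hik
    · exfalso
      have hq := hfst i hi hik
      rw [hie] at hq
      simp only [decide_eq_false_iff_not, not_le] at hq
      exact absurd hm.2.2 (not_le.mpr hq)
    · subst hik
      rw [hjd]
      exact hie.symm
    · exfalso
      have hlt : pvLt d (rem.getD k 0) (pvPick d a as) := by
        rw [hjd, ← hie]
        exact List.pairwise_iff_getElem.mp hpw k i hkl hi hik
      exact hmin (rem.getD k 0) (he ▸ hjavail) hlt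
  · have hget : rem[k]? = some (rem.getD k 0) := by
      rw [List.getElem?_eq_getElem hkl, hjd]
    obtain ⟨j0, hj0⟩ : ∃ j0, rem.getD k 0 = j0 := ⟨_, rfl⟩
    rw [hj0] at hjn ⊢
    rw [pvEraseIdx_eq_filter rem k j0 hnodup (hj0 ▸ hget), hrem]
    exact pvFilterSet r d done j0 hlen hjn

theorem pvStepMain (r p d : List Int) (N : Nat)
    (IH : ∀ (rem : List Nat) (done : List Bool) (C : List Int) (t tardy : Int),
      rem.length = N → done.length = r.length → C.length = r.length →
      rem = (pvEddOrder r d).filter (fun j => !done.getD j true) →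
      pvLoopB r p d rem t tardy
        = tardy + ((List.range r.length).countP
            (fun j => decide (d.getD j 0 < (pvLoopA r p d N done C t).getD j 0)) : Int)
          - (pvDoneTardy d r.length done C : Int))
    (rem : List Nat) (done : List Bool) (C : List Int) (T tardy : Int) (k a : Nat) (as : List Nat)
    (hN : rem.length = N + 1)
    (hlen : done.length = r.length) (hC : C.length = r.length)
    (hrem : rem = (pvEddOrder r d).filter (fun j => !done.getD j true))
    (hk : rem.findIdx? (fun j => decide (r.getD j 0 ≤ T)) = some k)
    (havail : pvAvailA r done T = a :: as) :
    pvLoopB r p d (rem.eraseIdx k) (T + p.getD (rem.getD k 0) 0)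
        (if d.getD (rem.getD k 0) 0 < T + p.getD (rem.getD k 0) 0 then tardy + 1 else tardy)
      = tardy
        + ((List.range r.length).countP (fun j => decide (d.getD j 0 <
            (pvLoopA r p d N (done.set (pvPick d a as) true)
              (C.set (pvPick d a as) (max T (r.getD (pvPick d a as) 0) + p.getD (pvPick d a as) 0))
              (max T (r.getD (pvPick d a as) 0) + p.getD (pvPick d a as) 0)).getD j 0)) : Int)
        - (pvDoneTardy d r.length done C : Int) := by
  obtain ⟨hpick, hne, hrt, hjn, hjdone, herase⟩ := pvStep hlen hrem hk
  have hpj : pvPick d a as = rem.getD k 0 := hpick a as havail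
  rw [hpj]
  have hkl : k < rem.length := pvFindIdx?_lt_length hk
  have hNlen : (rem.eraseIdx k).length = N := by
    rw [List.length_eraseIdx]
    simp only [if_pos hkl]
    omega
  generalize hj : rem.getD k 0 = j at hrt hjn hjdone herase ⊢
  have hmax : max T (r.getD j 0) = T := max_eq_left hrt
  rw [hmax]
  have hIH := IH (rem.eraseIdx k) (done.set j true) (C.set j (T + p.getD j 0)) (T + p.getD j 0)
    (if d.getD j 0 < T + p.getD j 0 then tardy + 1 else tardy)
    hNlen (by rw [List.length_set]; exact hlen) (by rw [List.length_set]; exact hC) herase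
  rw [hIH]
  have hq'j : ((done.set j true).getD j true
      && decide (d.getD j 0 < (C.set j (T + p.getD j 0)).getD j 0))
      = decide (d.getD j 0 < T + p.getD j 0) := by
    rw [pvGetD_set_self done j true true (by rw [hlen]; exact hjn),
      pvGetD_set_self C j (T + p.getD j 0) 0 (by rw [hC]; exact hjn)]
    simp
  have hdt : (pvDoneTardy d r.length (done.set j true) (C.set j (T + p.getD j 0)) : Int)
      = (pvDoneTardy d r.length done C : Int)
        + (if d.getD j 0 < T + p.getD j 0 then 1 else 0) := by
    unfold pvDoneTardy
    rw [pvCountP_update (List.range r.length) _ _ j (List.mem_range.mpr hjn) List.nodup_range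
      (fun x _ hxj => by rw [pvGetD_set_ne done j x true true hxj,
        pvGetD_set_ne C j x (T + p.getD j 0) 0 hxj])
      (by rw [hjdone]; simp)]
    rw [hq'j]
    simp only [decide_eq_true_eq]
  rw [hdt]
  split_ifs with hc <;> ring

theorem pvMain (r p d : List Int) : ∀ (N : Nat) (rem : List Nat) (done : List Bool)
    (C : List Int) (t tardy : Int),
    rem.length = N →
    done.length = r.length → C.length = r.length →
    rem = (pvEddOrder r d).filter (fun j => !done.getD j true) →
    pvLoopB r p d rem t tardy
      = tardy
        + ((List.range r.length).countP
            (fun j => decide (d.getD j 0 < (pvLoopA r p d N done C t).getD j 0)) : Int)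
        - (pvDoneTardy d r.length done C : Int) := by
  intro N
  induction N with
  | zero =>
    intro rem done C t tardy hN hlen hC hrem
    have hnil : rem = [] := List.eq_nil_of_length_eq_zero hN
    subst hnil
    have hB : pvLoopB r p d [] t tardy = tardy := by rw [pvLoopB]; rfl
    rw [hB]
    have hall : ∀ x ∈ pvEddOrder r d, done.getD x true = true := by
      intro x hx
      have := List.filter_eq_nil_iff.mp hrem.symm x hx
      simpa using this
    have hcnt : (List.range r.length).countP
        (fun j => decide (d.getD j 0 < (pvLoopA r p d 0 done C t).getD j 0))
        = pvDoneTardy d r.length done C := by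
      unfold pvDoneTardy
      apply List.countP_congr
      intro x hx
      have hx' : x ∈ pvEddOrder r d := (pvEddOrder_perm r d).mem_iff.mpr hx
      rw [hall x hx']
      simp [pvLoopA]
    rw [hcnt]
    ring
  | succ N ih =>
    intro rem done C t tardy hN hlen hC hrem
    have hne : rem ≠ [] := by intro h; rw [h] at hN; simp at hN
    rw [pvLoopB, if_neg (by simp [hne])]
    cases hfind : rem.findIdx? (fun j => decide (r.getD j 0 ≤ t)) with
    | some k =>
      obtain ⟨a, as, havail⟩ := List.exists_cons_of_ne_nil (pvStep hlen hrem hfind).2.1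
      have hA : pvLoopA r p d (N + 1) done C t
          = pvLoopA r p d N (done.set (pvPick d a as) true)
              (C.set (pvPick d a as) (max t (r.getD (pvPick d a as) 0) + p.getD (pvPick d a as) 0))
              (max t (r.getD (pvPick d a as) 0) + p.getD (pvPick d a as) 0) := by
        rw [pvLoopA, havail]
      rw [hA]
      exact pvStepMain r p d N ih rem done C t tardy k a as hN hlen hC hrem hfind havail
    | none =>
      have havailnil : pvAvailA r done t = [] := by
        rw [List.eq_nil_iff_forall_not_mem]
        intro x hx
        have hm := pvMem_avail.mp hx
        have hxrem : x ∈ rem := by rw [hrem]; exact pvMem_rem.mpr ⟨hm.1, hm.2.1⟩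
        have := List.findIdx?_eq_none_iff.mp hfind x hxrem
        simp only [decide_eq_false_iff_not, not_le] at this
        exact absurd hm.2.2 (not_le.mpr this)
      obtain ⟨x0, rest, hremc⟩ := List.exists_cons_of_ne_nil hne
      have hmapc : rem.map (fun j => r.getD j 0)
          = r.getD x0 0 :: rest.map (fun j => r.getD j 0) := by rw [hremc]; rfl
      have hperm : (((List.range r.length).filter (fun j => !done.getD j true)).map
            (fun j => r.getD j 0)).Perm (rem.map (fun j => r.getD j 0)) := by
        apply List.Perm.map
        rw [hrem]
        exact ((pvEddOrder_perm r d).filter _).symm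
      dsimp only
      rw [hmapc]
      dsimp only
      have hMin : pvMinRelease r done t = ((rest.map (fun j => r.getD j 0)).foldl min (r.getD x0 0)) := by
        unfold pvMinRelease
        cases hAc : ((List.range r.length).filter (fun j => !done.getD j true)).map
            (fun j => r.getD j 0) with
        | nil =>
          exfalso
          have := hperm.length_eq
          rw [hAc, hmapc] at this
          simp at this
        | cons y ys =>
          exact pvMinEq hperm hAc hmapc
      have hTmem : ∃ x ∈ rem, r.getD x 0 = ((rest.map (fun j => r.getD j 0)).foldl min (r.getD x0 0)) := by
        have hmm : ((rest.map (fun j => r.getD j 0)).foldl min (r.getD x0 0)) ∈ rem.map (fun j => r.getD j 0) := by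
          rw [hmapc]
          rcases PySem.List.foldl_min_mem (rest.map (fun j => r.getD j 0)) (r.getD x0 0) with h | h
          · rw [h]; exact List.mem_cons_self
          · exact List.mem_cons_of_mem _ h
        simpa using hmm
      cases hfind2 : rem.findIdx? (fun j => decide (r.getD j 0 ≤ ((rest.map (fun j => r.getD j 0)).foldl min (r.getD x0 0)))) with
      | none =>
        exfalso
        obtain ⟨x, hxrem, hxT⟩ := hTmem
        have := List.findIdx?_eq_none_iff.mp hfind2 x hxrem
        rw [hxT] at this
        simp at this
      | some k2 =>
        obtain ⟨a, as, havail2⟩ := List.exists_cons_of_ne_nil (pvStep hlen hrem hfind2).2.1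
        have hA : pvLoopA r p d (N + 1) done C t
            = pvLoopA r p d N (done.set (pvPick d a as) true)
                (C.set (pvPick d a as) (max ((rest.map (fun j => r.getD j 0)).foldl min (r.getD x0 0)) (r.getD (pvPick d a as) 0) + p.getD (pvPick d a as) 0))
                (max ((rest.map (fun j => r.getD j 0)).foldl min (r.getD x0 0)) (r.getD (pvPick d a as) 0) + p.getD (pvPick d a as) 0) := by
          rw [pvLoopA, havailnil]
          dsimp only
          rw [hMin, havail2]
        rw [hA]
        exact pvStepMain r p d N ih rem done C ((rest.map (fun j => r.getD j 0)).foldl min (r.getD x0 0)) tardy k2 a as hN hlen hC hrem hfind2 havail2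

-- ===== VERDICT (by name: the statement is the Claim_ definition above) =====
theorem edd_heuristic_spec : Claim_equal_edd_heuristic := by
  unfold Claim_equal_edd_heuristic
  intro r p d _ _
  unfold Spec_edd_heuristic edd_heuristic edd_heuristic_alt
  dsimp only
  have h1 := PySem.List.foldl_count_if
    (fun j => decide (d.getD j 0 < (pvLoopA r p d r.length (List.replicate r.length false)
      (List.replicate r.length 0) 0).getD j 0)) (List.range r.length) 0
  simp only [decide_eq_true_eq] at h1
  rw [h1]
  have hlen0 : (pvEddOrder r d).length = r.length := by
    rw [(pvEddOrder_perm r d).length_eq, List.length_range]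
  have h0 : pvEddOrder r d
      = (pvEddOrder r d).filter (fun j => !(List.replicate r.length false).getD j true) := by
    symm
    apply List.filter_eq_self.mpr
    intro x hx
    have hxn : x < r.length := by
      simpa [List.mem_range] using (pvEddOrder_perm r d).mem_iff.mp hx
    simp [List.getD_eq_getElem?_getD, hxn]
  have hmain := pvMain r p d r.length (pvEddOrder r d) (List.replicate r.length false)
    (List.replicate r.length 0) 0 0 hlen0 (by simp) (by simp) h0
  rw [hmain]
  have hdt : pvDoneTardy d r.length (List.replicate r.length false) (List.replicate r.length 0) = 0 := by
    unfold pvDoneTardy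
    rw [List.countP_eq_zero.mpr]
    intro x hx
    simp [List.getD_eq_getElem?_getD, List.mem_range.mp hx]
  rw [hdt]
  push_cast
  ring
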